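-- pv_equiv track=rewrite | github.com/maxkim77/Codingtest | 프로그래머스/unrated/181887. 홀수 vs 짝수/홀수 vs 짝수.py | solution
-- ===== SOURCE A (Python) =====
-- def solution(num_list):
--     odd_number = 0
--     even_number = 0
--     for index, num in enumerate(num_list):
--         if index % 2 == 1:
--             odd_number += num
--         else:
--             even_number += num
--     return max(odd_number, even_number)
-- ===== SOURCE B (Python) =====
-- def solution(num_list):
--     # Right-to-left fold with role-swapping accumulators: processing element x,
--     # the previous "even-indexed sum of the suffix" becomes the odd one and vice
--     # versa, so no index or parity test is ever needed.
--     even = 0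
--     odd = 0
--     for x in reversed(num_list):
--         even, odd = x + odd, even
--     return max(even, odd)
-- ===== Notes on version B (the rewrite author's own statement) =====
-- stated objective: alternative
-- what changed: Replaces the enumerate loop with a parity test by a right-to-left fold with role-swapping accumulators (even, odd = x + odd, even), which needs no indices or parity check at all.
import Mathlib
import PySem

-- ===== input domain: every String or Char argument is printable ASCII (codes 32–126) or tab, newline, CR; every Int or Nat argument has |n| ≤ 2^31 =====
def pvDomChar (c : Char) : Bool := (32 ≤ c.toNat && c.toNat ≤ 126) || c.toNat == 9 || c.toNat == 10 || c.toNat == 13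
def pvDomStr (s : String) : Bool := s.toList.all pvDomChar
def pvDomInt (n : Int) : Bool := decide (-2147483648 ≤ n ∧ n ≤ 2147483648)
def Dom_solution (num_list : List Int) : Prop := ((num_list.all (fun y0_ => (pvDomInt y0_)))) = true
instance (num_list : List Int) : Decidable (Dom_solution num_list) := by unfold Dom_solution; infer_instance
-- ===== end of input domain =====

-- B replaces A's enumerate loop with parity test by a right-to-left fold with
-- role-swapping accumulators (no indices, no parity check); alternative, same cost.

-- ===== PORT A =====
-- for index, num in enumerate(num_list): if index % 2 == 1: odd += num else: even += num
def solution (num_list : List Int) : Int :=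
  let r := (PySem.List.enumerate num_list 0).foldl
    (fun (acc : Int × Int) (p : Int × Int) =>
      if PySem.Int.mod p.1 2 = 1 then (acc.1 + p.2, acc.2) else (acc.1, acc.2 + p.2))
    (0, 0)
  max r.1 r.2

-- ===== PORT B =====
-- for x in reversed(num_list): even, odd = x + odd, even
def solution_alt (num_list : List Int) : Int :=
  let r := num_list.reverse.foldl (fun (p : Int × Int) (x : Int) => (x + p.2, p.1)) (0, 0)
  max r.1 r.2

-- ===== PRECONDITION & SPEC =====
def Spec_solution (num_list : List Int) (out : Int) : Prop := out = solution_alt num_list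
instance (num_list : List Int) (out : Int) : Decidable (Spec_solution num_list out) := by unfold Spec_solution; infer_instance

-- ===== CLAIM (what is proved, stated in full; the proofs are below) =====
def Claim_equal_solution : Prop := ∀ (num_list : List Int), Dom_solution num_list → Spec_solution num_list (solution num_list)

-- ===== LEMMAS AND PROOFS =====

-- even-indexed / odd-indexed sums, one element at a time
mutual
def pvEv : List Int → Int
  | [] => 0
  | a :: l => a + pvOd l
def pvOd : List Int → Int
  | [] => 0
  | _ :: l => pvEv l
end

lemma pvB_eq (l : List Int) :
    l.reverse.foldl (fun (p : Int × Int) (x : Int) => (x + p.2, p.1)) (0, 0)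
      = (pvEv l, pvOd l) := by
  rw [List.foldl_reverse]
  induction l with
  | nil => simp [pvEv, pvOd]
  | cons a l ih => simp [List.foldr_cons, ih, pvEv, pvOd]

lemma pymod_two (s : Int) : PySem.Int.mod s 2 = s % 2 := by
  simp [PySem.Int.mod, Int.fmod_eq_emod]

lemma foldA_eq (l : List Int) : ∀ (s o e : Int),
    (PySem.List.enumerate l s).foldl
      (fun (acc : Int × Int) (p : Int × Int) =>
        if PySem.Int.mod p.1 2 = 1 then (acc.1 + p.2, acc.2) else (acc.1, acc.2 + p.2))
      (o, e)
    = if PySem.Int.mod s 2 = 1 then (o + pvEv l, e + pvOd l) else (o + pvOd l, e + pvEv l) := by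
  induction l with
  | nil => intro s o e; simp [PySem.List.enumerate_nil, pvEv, pvOd]
  | cons a l ih =>
      intro s o e
      rw [PySem.List.enumerate_cons, List.foldl_cons]
      by_cases h : PySem.Int.mod s 2 = 1
      · have h1 : ¬ PySem.Int.mod (s + 1) 2 = 1 := by
          rw [pymod_two] at h ⊢; omega
        rw [if_pos h, ih, if_neg h1, if_pos h]
        refine Prod.ext ?_ ?_ <;> simp [pvEv, pvOd] <;> ring
      · have h1 : PySem.Int.mod (s + 1) 2 = 1 := by
          rw [pymod_two] at h ⊢; omega
        rw [if_neg h, ih, if_pos h1, if_neg h]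
        refine Prod.ext ?_ ?_ <;> simp [pvEv, pvOd] <;> ring

-- ===== VERDICT (by name: the statement is the Claim_ definition above) =====
theorem solution_spec : Claim_equal_solution := by
  intro l _
  unfold Spec_solution solution solution_alt
  rw [foldA_eq, pvB_eq]
  have h0 : ¬ PySem.Int.mod (0 : Int) 2 = 1 := by rw [pymod_two]; decide
  rw [if_neg h0]
  simp [max_comm]
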